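-- pv_equiv track=rewrite | github.com/sifaka-ai/sifaka | sifaka/validators/validation_context.py | _filter_content_expansion_suggestions
-- ===== SOURCE A (Python) =====
-- from typing import Any, Dict, List, Optional
--
-- def _filter_content_expansion_suggestions(suggestions: List[str]) -> List[str]:
--     """Filter suggestions that would expand content when length reduction is needed."""
--     CONTENT_EXPANSION_PHRASES = [
--         "provide more",
--         "include more",
--         "add more",
--         "incorporate",
--         "enhance",
--         "expand",
--         "elaborate",
--         "examples",
--         "case studies",
--         "provide additional",
--         "include additional",
--         "add details",
--         "give more",
--         "offer more",
--         "present more",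
--         "show more",
--     ]
--
--     filtered_suggestions = []
--     for suggestion in suggestions:
--         suggestion_lower = suggestion.lower()
--         if not any(phrase in suggestion_lower for phrase in CONTENT_EXPANSION_PHRASES):
--             filtered_suggestions.append(suggestion)
--
--     return filtered_suggestions
-- ===== SOURCE B (Python) =====
-- from typing import List
--
-- _CONTENT_EXPANSION_PHRASES = [
--     "provide more", "include more", "add more", "incorporate", "enhance",
--     "expand", "elaborate", "examples", "case studies", "provide additional",
--     "include additional", "add details", "give more", "offer more",
--     "present more", "show more",
-- ]
--
--
-- def _expands(text: str) -> bool: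
--     """Single left-to-right scan: at each position try every phrase."""
--     t = text.lower()
--     return any(
--         t.startswith(p, j)
--         for j in range(len(t) + 1)
--         for p in _CONTENT_EXPANSION_PHRASES
--     )
--
--
-- def _filter_content_expansion_suggestions(suggestions: List[str]) -> List[str]:
--     return [s for s in suggestions if not _expands(s)]
-- ===== Notes on version B (the rewrite author's own statement) =====
-- stated objective: alternative
-- what changed: A loops over the phrase list and does a substring test (phrase in text) for each phrase; B makes one left-to-right scan of the lowered string, trying every phrase as a prefix at each position, so the per-phrase substring searches disappear.
import Mathlib
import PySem

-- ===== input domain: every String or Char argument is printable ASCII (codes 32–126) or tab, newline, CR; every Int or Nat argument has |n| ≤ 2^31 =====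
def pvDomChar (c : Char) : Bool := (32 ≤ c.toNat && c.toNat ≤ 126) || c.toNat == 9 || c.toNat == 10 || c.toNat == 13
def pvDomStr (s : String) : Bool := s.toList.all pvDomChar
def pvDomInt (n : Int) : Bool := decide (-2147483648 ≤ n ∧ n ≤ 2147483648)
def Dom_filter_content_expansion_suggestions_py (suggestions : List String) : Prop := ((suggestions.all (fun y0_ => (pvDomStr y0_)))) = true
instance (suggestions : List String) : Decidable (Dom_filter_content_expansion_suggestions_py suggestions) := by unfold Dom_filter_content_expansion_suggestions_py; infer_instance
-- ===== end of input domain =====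

-- B replaces A's per-phrase substring loop by one left-to-right scan of the string, trying every
-- phrase at each position (objective: alternative; return value only, neither version mutates input).

-- ===== PORT A =====
def pvPhrasesA : List String :=
  ["provide more", "include more", "add more", "incorporate", "enhance",
   "expand", "elaborate", "examples", "case studies", "provide additional",
   "include additional", "add details", "give more", "offer more",
   "present more", "show more"]

def filter_content_expansion_suggestions_py (suggestions : List String) : List String :=
  suggestions.foldl
    (fun filtered_suggestions suggestion =>
      let suggestion_lower := PySem.Str.lower suggestion
      if pvPhrasesA.any (fun phrase => PySem.Str.isIn phrase suggestion_lower)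
      then filtered_suggestions
      else filtered_suggestions ++ [suggestion])
    []

-- ===== PORT B =====
def pvPhrasesB : List (List Char) :=
  ["provide more".toList, "include more".toList, "add more".toList, "incorporate".toList,
   "enhance".toList, "expand".toList, "elaborate".toList, "examples".toList,
   "case studies".toList, "provide additional".toList, "include additional".toList,
   "add details".toList, "give more".toList, "offer more".toList,
   "present more".toList, "show more".toList]

-- Python's t.startswith(p, j) with 0 ≤ j ≤ len(t) is exactly 'p is a prefix of t dropped j chars'.
def pvExpands (s : String) : Bool :=
  let t := PySem.Chars.lower s.toList
  (List.range (t.length + 1)).any (fun j =>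
    pvPhrasesB.any (fun p => PySem.Chars.startswith (t.drop j) p))

def filter_content_expansion_suggestions_py_alt (suggestions : List String) : List String :=
  suggestions.filter (fun s => !pvExpands s)

-- ===== PRECONDITION & SPEC =====
def Spec_filter_content_expansion_suggestions_py (suggestions : List String) (out : List String) : Prop := out = filter_content_expansion_suggestions_py_alt suggestions
instance (suggestions : List String) (out : List String) : Decidable (Spec_filter_content_expansion_suggestions_py suggestions out) := by unfold Spec_filter_content_expansion_suggestions_py; infer_instance

-- ===== CLAIM (what is proved, stated in full; the proofs are below) =====
def Claim_equal_filter_content_expansion_suggestions_py : Prop := ∀ (suggestions : List String), Dom_filter_content_expansion_suggestions_py suggestions → Spec_filter_content_expansion_suggestions_py suggestions (filter_content_expansion_suggestions_py suggestions)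

-- ===== LEMMAS AND PROOFS =====

lemma pvPhrasesB_eq : pvPhrasesB = pvPhrasesA.map String.toList := by decide

-- A's per-string condition and B's per-string condition agree.
lemma pv_cond_eq (s : String) :
    pvPhrasesA.any (fun phrase => PySem.Str.isIn phrase (PySem.Str.lower s)) = pvExpands s := by
  rw [Bool.eq_iff_iff]
  simp only [pvExpands, pvPhrasesB_eq, List.any_eq_true, List.mem_map, List.mem_range,
    PySem.Chars.startswith_iff, PySem.Str.isIn_eq, PySem.Str.toList_lower]
  set t := PySem.Chars.lower s.toList with ht
  constructor
  · rintro ⟨p, hp, hin⟩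
    obtain ⟨j, hpre⟩ := (PySem.Chars.exists_prefix_drop_iff_isIn p.toList t).2 hin
    by_cases hj : j ≤ t.length
    · exact ⟨j, by omega, p.toList, ⟨p, hp, rfl⟩, hpre⟩
    · refine ⟨t.length, by omega, p.toList, ⟨p, hp, rfl⟩, ?_⟩
      rw [List.drop_length]
      rwa [List.drop_eq_nil_of_le (by omega)] at hpre
  · rintro ⟨j, _, _, ⟨p, hp, rfl⟩, hpre⟩
    exact ⟨p, hp, (PySem.Chars.exists_prefix_drop_iff_isIn p.toList t).1 ⟨j, hpre⟩⟩

-- ===== VERDICT (by name: the statement is the Claim_ definition above) =====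
theorem filter_content_expansion_suggestions_py_spec : Claim_equal_filter_content_expansion_suggestions_py := by
  intro suggestions _
  show _ = _
  unfold filter_content_expansion_suggestions_py filter_content_expansion_suggestions_py_alt
  have h : (fun (filtered_suggestions : List String) (suggestion : String) =>
      let suggestion_lower := PySem.Str.lower suggestion
      if pvPhrasesA.any (fun phrase => PySem.Str.isIn phrase suggestion_lower)
      then filtered_suggestions
      else filtered_suggestions ++ [suggestion])
      = fun acc x => if (!pvExpands x) = true then acc ++ [id x] else acc := by
    funext acc x
    simp only [pv_cond_eq, id]
    cases pvExpands x <;> simp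
  rw [h, PySem.List.foldl_append_if]
  simp
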